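-- pv_equiv track=rewrite | github.com/id523a/Computer12 | Assembler12/Assembler12.py | mif_lines
-- ===== SOURCE A (Python) =====
-- from itertools import chain
--
-- def mif_lines(mem):
--     # Write file header
--     yield '-- Assembler12 - generated file'
--     yield 'WIDTH=12;'
--     yield f'DEPTH={len(mem)};'
--     yield 'ADDRESS_RADIX=HEX;'
--     yield 'DATA_RADIX=HEX;'
--     yield ''
--     yield 'CONTENT BEGIN'
--     # Run-length encode file contents
--     prev_word = -1;
--     run_start = 0;
--     address = 0;
--     addr_width = (len(mem).bit_length() + 3) // 4;
--     # The 'mem' array is extended with a value that cannot be in the input,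
--     # so that the last run is finished properly
--     for word in chain(mem, (None,)):
--         # Negative values in the input should be written as zeros
--         if word is not None and word < 0:
--             word = 0
--         # If a new run has started,
--         if word != prev_word:
--             run_length = address - run_start
--             # write out the previous run
--             if run_length >= 1:
--                 run_end = address - 1
--                 if run_length == 1:
--                     addr_part = f'\t{run_start:0{addr_width}X}'
--                 else:
--                     addr_part = f'\t[{run_start:0{addr_width}X}..{run_end:0{addr_width}X}]'
--                 yield f'{addr_part} : {prev_word:03X};'
--             # Start the new run
--             run_start = address
--             prev_word = word
--         address += 1
--     yield 'END;'
-- ===== SOURCE B (Python) =====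
-- def mif_lines(mem):
--     yield '-- Assembler12 - generated file'
--     yield 'WIDTH=12;'
--     yield f'DEPTH={len(mem)};'
--     yield 'ADDRESS_RADIX=HEX;'
--     yield 'DATA_RADIX=HEX;'
--     yield ''
--     yield 'CONTENT BEGIN'
--     n = len(mem)
--     addr_width = (n.bit_length() + 3) // 4
--     norm = [0 if w < 0 else w for w in mem]
--     # change points: pair each word with its predecessor by zipping against a
--     # shifted copy; a run starts exactly where the two differ
--     items = [(i, v) for i, (v, p) in enumerate(zip(norm, [None] + norm)) if v != p]
--     # each run ends where the next one starts; the last ends at n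
--     ends = [i for i, _ in items][1:] + [n]
--     for (s, v), e in zip(items, ends):
--         if e - s == 1:
--             addr_part = f'\t{s:0{addr_width}X}'
--         else:
--             addr_part = f'\t[{s:0{addr_width}X}..{e - 1:0{addr_width}X}]'
--         yield f'{addr_part} : {v:03X};'
--     yield 'END;'
-- ===== Notes on version B (the rewrite author's own statement) =====
-- stated objective: alternative
-- what changed: Replaces A's single-pass sentinel-terminated run-tracking state machine (prev_word/run_start/address bookkeeping with deferred emission) by staged passes: zip the normalized words against a shifted copy of themselves to list the change points, pair each run start with the next start (the last with len(mem)) to get its extent, and emit one line per boundary pair; no run accumulator or run lengths are ever maintained.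
import Mathlib
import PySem

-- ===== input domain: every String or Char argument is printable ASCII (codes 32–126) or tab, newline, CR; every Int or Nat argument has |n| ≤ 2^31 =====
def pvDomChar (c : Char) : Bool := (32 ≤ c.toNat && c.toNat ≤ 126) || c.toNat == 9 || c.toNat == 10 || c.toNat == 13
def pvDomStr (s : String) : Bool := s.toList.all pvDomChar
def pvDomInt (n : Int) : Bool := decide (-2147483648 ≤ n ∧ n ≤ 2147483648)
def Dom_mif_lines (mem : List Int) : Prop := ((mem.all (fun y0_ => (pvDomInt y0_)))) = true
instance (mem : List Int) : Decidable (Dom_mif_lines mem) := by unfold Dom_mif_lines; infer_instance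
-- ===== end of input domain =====

-- B replaces A's single-pass sentinel-terminated run-tracking state machine by staged
-- passes: it finds the change points by zipping the normalized words with a shifted
-- copy, pairs each run start with the next start to get its extent, and emits one
-- line per boundary pair — no run accumulator and no run lengths (simpler).

-- shared formatting helpers (both Pythons use the identical format strings)

-- one uppercase hex digit
def pyHexDigit (n : Nat) : Char := Char.ofNat (if n < 10 then 48 + n else 55 + n)

-- uppercase hex digits of a natural number (no padding), as Python's '{:X}'
def pyHexNat (n : Nat) : String :=
  if _h : n < 16 then String.ofList [pyHexDigit n]
  else pyHexNat (n / 16) ++ String.ofList [pyHexDigit (n % 16)]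
decreasing_by exact Nat.div_lt_self (by omega) (by omega)

-- Python f'{v:0{w}X}'; exact for 0 ≤ v (both programs only format nonnegative values)
def pyHexPad (v : Int) (w : Nat) : String :=
  let s := pyHexNat v.toNat
  String.ofList (List.replicate (w - s.length) '0') ++ s

-- Python int.bit_length() for a natural number
def pyBitLength (n : Nat) : Nat := if n = 0 then 0 else Nat.log2 n + 1

-- ===== PORT A =====
-- the content line for the run [rs..re] holding word (A's format strings)
def runLine (addrW : Nat) (rs re : Int) (word : Int) : String :=
  let addr_part :=
    if rs = re then "\t" ++ pyHexPad rs addrW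
    else "\t[" ++ pyHexPad rs addrW ++ ".." ++ pyHexPad re addrW ++ "]"
  addr_part ++ " : " ++ pyHexPad word 3 ++ ";"

-- A's loop over chain(mem, (None,)): state (prev_word, run_start, address);
-- the [] case is the None sentinel iteration (always ≠ prev_word, then the loop ends)
def mifALoop (addrW : Nat) : List Int → Int → Int → Int → List String
  | [], prev, run_start, address =>
      if address - run_start ≥ 1 then [runLine addrW run_start (address - 1) prev] else []
  | w :: rest, prev, run_start, address =>
      let word := if w < 0 then 0 else w
      if word = prev then
        mifALoop addrW rest prev run_start (address + 1)
      else
        (if address - run_start ≥ 1 then [runLine addrW run_start (address - 1) prev] else [])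
          ++ mifALoop addrW rest word address (address + 1)

def mif_lines (mem : List Int) : List String :=
  ["-- Assembler12 - generated file", "WIDTH=12;", "DEPTH=" ++ toString mem.length ++ ";",
   "ADDRESS_RADIX=HEX;", "DATA_RADIX=HEX;", "", "CONTENT BEGIN"]
  ++ mifALoop ((pyBitLength mem.length + 3) / 4) mem (-1) 0 0 ++ ["END;"]

-- ===== PORT B =====
-- Source B's content line: single-address form when e - s == 1, range form otherwise
def mifBLine (addrW : Nat) (s e : Int) (v : Int) : String :=
  let addr_part :=
    if e - s = 1 then "\t" ++ pyHexPad s addrW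
    else "\t[" ++ pyHexPad s addrW ++ ".." ++ pyHexPad (e - 1) addrW ++ "]"
  addr_part ++ " : " ++ pyHexPad v 3 ++ ";"

-- [(i, v) for i, (v, p) in enumerate(zip(norm, [None] + norm)) if v != p]
def mifItems (norm : List Int) : List (Int × Int) :=
  (PySem.List.enumerate (norm.zip ((none : Option Int) :: norm.map some))).filterMap
    (fun q => if some q.2.1 ≠ q.2.2 then some (q.1, q.2.1) else none)

def mif_lines_alt (mem : List Int) : List String :=
  let norm := mem.map (fun w => if w < 0 then 0 else w)
  let items := mifItems norm
  let ends := (items.map Prod.fst).tail ++ [(mem.length : Int)]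
  ["-- Assembler12 - generated file", "WIDTH=12;", "DEPTH=" ++ toString mem.length ++ ";",
   "ADDRESS_RADIX=HEX;", "DATA_RADIX=HEX;", "", "CONTENT BEGIN"]
  ++ (items.zip ends).map (fun q => mifBLine ((pyBitLength mem.length + 3) / 4) q.1.1 q.2 q.1.2)
  ++ ["END;"]

-- ===== PRECONDITION & SPEC =====
def Spec_mif_lines (mem : List Int) (out : List String) : Prop := out = mif_lines_alt mem
instance (mem : List Int) (out : List String) : Decidable (Spec_mif_lines mem out) := by unfold Spec_mif_lines; infer_instance

-- ===== CLAIM (what is proved, stated in full; the proofs are below) =====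
def Claim_equal_mif_lines : Prop := ∀ (mem : List Int), Dom_mif_lines mem → Spec_mif_lines mem (mif_lines mem)

-- ===== LEMMAS AND PROOFS =====

-- maximal runs of equal words as (word, length): shared intermediate of both proofs
def mifRuns : List Int → List (Int × Nat)
  | [] => []
  | w :: rest =>
      (w, (rest.takeWhile (· == w)).length + 1) :: mifRuns (rest.dropWhile (· == w))
termination_by l => l.length
decreasing_by simpa using Nat.lt_succ_of_le (List.length_dropWhile_le _ _)

-- one line per run, advancing the address by the run length
def mifBLoop (addrW : Nat) : List (Int × Nat) → Int → List String
  | [], _ => []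
  | (word, n) :: gs, address =>
      runLine addrW address (address + n - 1) word :: mifBLoop addrW gs (address + n)

-- A's loop on the already-normalized list (proof helper)
def mifALoop' (addrW : Nat) : List Int → Int → Int → Int → List String
  | [], prev, run_start, address =>
      if address - run_start ≥ 1 then [runLine addrW run_start (address - 1) prev] else []
  | w :: rest, prev, run_start, address =>
      if w = prev then
        mifALoop' addrW rest prev run_start (address + 1)
      else
        (if address - run_start ≥ 1 then [runLine addrW run_start (address - 1) prev] else [])
          ++ mifALoop' addrW rest w address (address + 1)

theorem mifALoop_norm (addrW : Nat) (l : List Int) :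
    ∀ prev rs addr, mifALoop addrW l prev rs addr
      = mifALoop' addrW (l.map (fun w => if w < 0 then 0 else w)) prev rs addr := by
  induction l with
  | nil => intro prev rs addr; rfl
  | cons w t ih =>
      intro prev rs addr
      simp only [mifALoop, mifALoop', List.map]
      by_cases h : (if w < 0 then (0:Int) else w) = prev <;> simp [h, ih]

-- while inside an open run (rs < addr), A's loop emits the run extended by the maximal
-- prefix equal to prev and then behaves like the run-loop on the runs of the remainder
theorem mifALoop'_runs (addrW : Nat) (l : List Int) :
    ∀ prev rs addr, rs + 1 ≤ addr →
      mifALoop' addrW l prev rs addr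
        = runLine addrW rs (addr + ((l.takeWhile (· == prev)).length : Int) - 1) prev
            :: mifBLoop addrW (mifRuns (l.dropWhile (· == prev)))
                (addr + ((l.takeWhile (· == prev)).length : Int)) := by
  induction l with
  | nil =>
      intro prev rs addr h
      simp only [mifALoop', List.takeWhile, List.dropWhile, mifRuns, mifBLoop]
      rw [if_pos (by omega)]
      norm_num
  | cons w t ih =>
      intro prev rs addr h
      by_cases hw : w = prev
      · subst hw
        simp only [mifALoop', List.takeWhile, List.dropWhile, beq_self_eq_true]
        rw [ih w rs (addr + 1) (by omega)]
        have e1 : addr + 1 + ((t.takeWhile (· == w)).length : Int) - 1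
            = addr + (((t.takeWhile (· == w)).length + 1 : Nat) : Int) - 1 := by push_cast; ring
        have e2 : addr + 1 + ((t.takeWhile (· == w)).length : Int)
            = addr + (((t.takeWhile (· == w)).length + 1 : Nat) : Int) := by push_cast; ring
        rw [e1, e2]
        simp
      · have hb : (w == prev) = false := by simp [hw]
        simp only [mifALoop', if_neg hw, List.takeWhile, List.dropWhile, hb]
        rw [if_pos (by omega : addr - rs ≥ 1)]
        rw [ih w addr (addr + 1) (by omega)]
        simp only [mifRuns, mifBLoop, List.length_nil, Nat.cast_zero, List.cons_append,
          List.nil_append]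
        have e1 : addr + (0:Int) - 1 = addr - 1 := by ring
        have e2 : addr + 1 + ((t.takeWhile (· == w)).length : Int) - 1
            = addr + (((t.takeWhile (· == w)).length + 1 : Nat) : Int) - 1 := by push_cast; ring
        have e3 : addr + 1 + ((t.takeWhile (· == w)).length : Int)
            = addr + (((t.takeWhile (· == w)).length + 1 : Nat) : Int) := by push_cast; ring
        rw [e1, e2, e3]
        norm_num

theorem mifLoopsA_agree (addrW : Nat) (mem : List Int) :
    mifALoop addrW mem (-1) 0 0
      = mifBLoop addrW (mifRuns (mem.map (fun w => if w < 0 then 0 else w))) 0 := by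
  rw [mifALoop_norm]
  cases mem with
  | nil => norm_num [mifALoop', mifRuns, mifBLoop]
  | cons m ms =>
      set w : Int := if m < 0 then 0 else m with hwdef
      have hw : w ≠ -1 := by rw [hwdef]; split <;> omega
      simp only [List.map]
      rw [show (mifALoop' addrW (w :: ms.map (fun w => if w < 0 then 0 else w)) (-1) 0 0)
          = mifALoop' addrW (ms.map (fun w => if w < 0 then 0 else w)) w 0 1 by
        simp [mifALoop', hw]]
      rw [mifALoop'_runs addrW _ w 0 1 (by omega)]
      simp only [mifRuns, mifBLoop]
      have e1 : (1:Int) + (((ms.map (fun w => if w < 0 then 0 else w)).takeWhile (· == w)).length : Int) - 1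
          = 0 + ((((ms.map (fun w => if w < 0 then 0 else w)).takeWhile (· == w)).length + 1 : Nat) : Int) - 1 := by
        push_cast; ring
      have e2 : (1:Int) + (((ms.map (fun w => if w < 0 then 0 else w)).takeWhile (· == w)).length : Int)
          = 0 + ((((ms.map (fun w => if w < 0 then 0 else w)).takeWhile (· == w)).length + 1 : Nat) : Int) := by
        push_cast; ring
      rw [e1, e2]

-- ===== B-side lemmas: change points = run starts =====

-- recursive form of the change-point comprehension
def mifJ : List Int → Option Int → Int → List (Int × Int)
  | [], _, _ => []
  | x :: xs, p, a =>
      (if some x ≠ p then [(a, x)] else []) ++ mifJ xs (some x) (a + 1)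

-- the (start, word) pairs of the runs, starting at address a
def runItems : List (Int × Nat) → Int → List (Int × Int)
  | [], _ => []
  | (w, n) :: gs, a => (a, w) :: runItems gs (a + (n : Int))

theorem mifJ_shift (l : List Int) : ∀ p a,
    mifJ l p (a + 1) = (mifJ l p a).map (fun q => (q.1 + 1, q.2)) := by
  induction l with
  | nil => intro p a; rfl
  | cons x xs ih =>
      intro p a
      by_cases h : some x ≠ p <;> simp [mifJ, h, ih]

theorem mifItems_eq_J (l : List Int) : ∀ p a,
    (PySem.List.enumerate (l.zip (p :: l.map some)) a).filterMap
      (fun q => if some q.2.1 ≠ q.2.2 then some (q.1, q.2.1) else none)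
      = mifJ l p a := by
  induction l with
  | nil => intro p a; rfl
  | cons x xs ih =>
      intro p a
      simp only [List.map, List.zip_cons_cons, PySem.List.enumerate_cons, List.filterMap_cons,
        mifJ, ih]
      by_cases h : some x ≠ p
      · simp [h, mifJ_shift]
      · simp [h, mifJ_shift]

theorem mifJ_runs (xs : List Int) : ∀ (w : Int) (a : Int),
    mifJ xs (some w) (a + 1)
      = runItems (mifRuns (xs.dropWhile (· == w))) (a + 1 + ((xs.takeWhile (· == w)).length : Int)) := by
  induction xs with
  | nil => intro w a; simp [mifJ, mifRuns, runItems]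
  | cons y ys ih =>
      intro w a
      by_cases hy : y = w
      · subst hy
        simp only [mifJ, List.takeWhile, List.dropWhile, beq_self_eq_true, ne_eq,
          not_true_eq_false]
        rw [show a + 1 + 1 = (a + 1) + 1 from rfl, ih y (a + 1)]
        simp only [if_false, List.nil_append, List.length_cons]
        congr 1
        push_cast
        ring
      · have hb : (y == w) = false := by simp [hy]
        simp only [mifJ, List.takeWhile, List.dropWhile, hb, ne_eq]
        rw [if_pos (by simpa using hy)]
        simp only [List.cons_append, List.nil_append, List.length_nil, Nat.cast_zero, add_zero]
        rw [show a + 1 + 1 = (a + 1) + 1 from rfl, ih y (a + 1)]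
        simp only [mifRuns, runItems]
        congr 1
        push_cast
        ring

theorem mifItems_runs (l : List Int) :
    mifItems l = runItems (mifRuns l) 0 := by
  unfold mifItems
  rw [mifItems_eq_J]
  cases l with
  | nil => simp [mifJ, mifRuns, runItems]
  | cons x xs =>
      simp only [mifJ, ne_eq, reduceCtorEq, not_false_eq_true, if_pos, List.cons_append,
        List.nil_append]
      rw [show (0:Int) + 1 = 0 + 1 from rfl, mifJ_runs xs x 0]
      simp only [mifRuns, runItems]
      congr 1
      push_cast
      ring

-- mifBLine agrees with runLine when the run is nonempty
theorem mifBLine_eq_runLine (addrW : Nat) (s e v : Int) (_h : s + 1 ≤ e) :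
    mifBLine addrW s e v = runLine addrW s (e - 1) v := by
  unfold mifBLine runLine
  by_cases h1 : e - s = 1
  · rw [if_pos h1, if_pos (by omega)]
  · rw [if_neg h1, if_neg (by omega)]

def runsSum (gs : List (Int × Nat)) : Nat := (gs.map Prod.snd).sum

theorem mifZip_eq_BLoop (addrW : Nat) (gs : List (Int × Nat)) :
    ∀ (a T : Int), (∀ p ∈ gs, 1 ≤ p.2) → T = a + (runsSum gs : Int) →
      ((runItems gs a).zip (((runItems gs a).map Prod.fst).tail ++ [T])).map
          (fun q => mifBLine addrW q.1.1 q.2 q.1.2)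
        = mifBLoop addrW gs a := by
  induction gs with
  | nil => intro a T _ _; rfl
  | cons g gs ih =>
      intro a T hpos hT
      obtain ⟨w, n⟩ := g
      have hn : 1 ≤ n := hpos (w, n) (by simp)
      cases gs with
      | nil =>
          simp only [runItems, runsSum, List.map_cons, List.sum_cons, List.sum_nil, List.map_nil,
            List.tail_cons, List.nil_append, List.zip_cons_cons, List.zip_nil_left,
            List.map_nil, mifBLoop] at hT ⊢
          have hT' : T = a + (n : Int) := by push_cast at hT; omega
          subst hT'
          rw [mifBLine_eq_runLine addrW a (a + (n : Int)) w (by omega)]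
      | cons g2 gs2 =>
          obtain ⟨w2, n2⟩ := g2
          have htail := ih (a + (n : Int)) T
            (fun p hp => hpos p (List.mem_cons_of_mem _ hp))
            (by simp only [runsSum, List.map_cons, List.sum_cons] at hT ⊢; push_cast at hT ⊢; omega)
          simp only [runItems, List.map_cons, List.tail_cons, List.cons_append,
            List.zip_cons_cons, List.map_cons, mifBLoop] at htail ⊢
          rw [mifBLine_eq_runLine addrW a (a + (n : Int)) w (by omega), htail]

theorem runsSum_eq_length (l : List Int) : runsSum (mifRuns l) = l.length := by
  fun_induction mifRuns l with
  | case1 => rfl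
  | case2 w rest ih =>
      simp only [runsSum, List.map_cons, List.sum_cons] at ih ⊢
      have h := congrArg List.length (List.takeWhile_append_dropWhile (p := (· == w)) (l := rest))
      simp only [List.length_append] at h
      simp only [List.length_cons]
      omega

theorem mifRuns_pos (l : List Int) : ∀ p ∈ mifRuns l, 1 ≤ p.2 := by
  fun_induction mifRuns l with
  | case1 => simp
  | case2 w rest ih =>
      intro p hp
      rcases List.mem_cons.mp hp with h | h
      · subst h; simp
      · exact ih p h

-- ===== VERDICT (by name: the statement is the Claim_ definition above) =====
theorem mif_lines_spec : Claim_equal_mif_lines := by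
  intro mem _
  unfold Spec_mif_lines mif_lines
  rw [mifLoopsA_agree]
  simp only [mif_lines_alt, mifItems_runs]
  rw [mifZip_eq_BLoop _ _ 0 ((mem.length : Int)) (mifRuns_pos _)
    (by rw [runsSum_eq_length]; simp)]
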